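-- pv_equiv track=rewrite | github.com/guzmandam/think-tank | app/tables_ex.py | eliminar_ruido
-- ===== SOURCE A (Python) =====
-- def eliminar_ruido(lst):
--     lista_guardado = []
--     lista_resultado = []
--     elemento_append = True
--     for renglon in lst:
--         if (renglon.startswith("Expediente:"))|("Derechos de Autor" in renglon):
--             elemento_append = not(elemento_append)
--             if ("Derechos de Autor" in renglon):
--                 lista_guardado.append(not(elemento_append))
--             else:
--                 lista_guardado.append(elemento_append)
--         else:
--             lista_guardado.append(elemento_append)
--     for i in range(len(lst)):
--         if lista_guardado[i]:
--             lista_resultado.append(lst[i])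
--     return lista_resultado
-- ===== SOURCE B (Python) =====
-- def eliminar_ruido(lst):
--     resultado = []
--     keep = True
--     for renglon in lst:
--         if "Derechos de Autor" in renglon:
--             if keep:
--                 resultado.append(renglon)
--             keep = not keep
--         elif renglon.startswith("Expediente:"):
--             keep = not keep
--             if keep:
--                 resultado.append(renglon)
--         else:
--             if keep:
--                 resultado.append(renglon)
--     return resultado
-- ===== Notes on version B (the rewrite author's own statement) =====
-- stated objective: simpler
-- what changed: Single pass with a boolean toggle that appends kept lines directly, instead of building a parallel keep-flag list and then a second index-based pass over range(len(lst)).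
import Mathlib
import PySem

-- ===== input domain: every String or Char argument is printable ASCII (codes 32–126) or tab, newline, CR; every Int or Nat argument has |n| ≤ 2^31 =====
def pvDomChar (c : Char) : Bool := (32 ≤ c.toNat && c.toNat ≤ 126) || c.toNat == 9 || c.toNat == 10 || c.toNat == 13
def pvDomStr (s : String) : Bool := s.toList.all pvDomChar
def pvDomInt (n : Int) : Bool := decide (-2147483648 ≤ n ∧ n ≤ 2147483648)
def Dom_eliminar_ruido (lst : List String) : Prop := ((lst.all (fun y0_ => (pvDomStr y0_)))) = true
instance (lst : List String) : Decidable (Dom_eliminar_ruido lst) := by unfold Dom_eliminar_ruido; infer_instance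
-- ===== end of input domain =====

-- B replaces A's two passes (build a parallel keep-flag list, then filter by index) by a single
-- loop with a boolean toggle that appends kept lines directly (objective: simpler).

-- ===== PORT A =====
-- A-side helper: the body of A's first loop (state = (lista_guardado, elemento_append))
def pvStepA (st : List Bool × Bool) (renglon : String) : List Bool × Bool :=
  let lista_guardado := st.1
  let elemento_append := st.2
  if PySem.Str.startswith renglon "Expediente:" || PySem.Str.isIn "Derechos de Autor" renglon then
    let elemento_append := !elemento_append
    if PySem.Str.isIn "Derechos de Autor" renglon then
      (lista_guardado ++ [!elemento_append], elemento_append)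
    else
      (lista_guardado ++ [elemento_append], elemento_append)
  else
    (lista_guardado ++ [elemento_append], elemento_append)

def eliminar_ruido (lst : List String) : List String :=
  let lista_guardado := (lst.foldl pvStepA ([], true)).1
  (PySem.List.pyRange 0 lst.length 1).foldl
    (fun lista_resultado i =>
      if PySem.List.pyGetD lista_guardado i false then
        lista_resultado ++ [PySem.List.pyGetD lst i ""]
      else lista_resultado) []

-- ===== PORT B =====
-- B-side helper: the body of B's single loop (state = (resultado, keep))
def pvStepB (st : List String × Bool) (renglon : String) : List String × Bool :=
  let resultado := st.1
  let keep := st.2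
  if PySem.Str.isIn "Derechos de Autor" renglon then
    ((if keep then resultado ++ [renglon] else resultado), !keep)
  else if PySem.Str.startswith renglon "Expediente:" then
    ((if !keep then resultado ++ [renglon] else resultado), !keep)
  else
    ((if keep then resultado ++ [renglon] else resultado), keep)

def eliminar_ruido_alt (lst : List String) : List String :=
  (lst.foldl pvStepB ([], true)).1

-- ===== PRECONDITION & SPEC =====
def Spec_eliminar_ruido (lst : List String) (out : List String) : Prop := out = eliminar_ruido_alt lst
instance (lst : List String) (out : List String) : Decidable (Spec_eliminar_ruido lst out) := by unfold Spec_eliminar_ruido; infer_instance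

-- ===== CLAIM (what is proved, stated in full; the proofs are below) =====
def Claim_equal_eliminar_ruido : Prop := ∀ (lst : List String), Dom_eliminar_ruido lst → Spec_eliminar_ruido lst (eliminar_ruido lst)

-- ===== LEMMAS AND PROOFS =====

-- Proof-only helpers: the keep-bit and next flag one line produces, shared by both step functions.
def pvBit (x : String) (flag : Bool) : Bool :=
  if PySem.Str.isIn "Derechos de Autor" x then flag
  else if PySem.Str.startswith x "Expediente:" then !flag
  else flag

def pvFlag (x : String) (flag : Bool) : Bool :=
  if PySem.Str.startswith x "Expediente:" || PySem.Str.isIn "Derechos de Autor" x then !flag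
  else flag

theorem stepA_case (g : List Bool) (flag : Bool) (x : String) :
    pvStepA (g, flag) x = (g ++ [pvBit x flag], pvFlag x flag) := by
  cases hd : PySem.Str.isIn "Derechos de Autor" x <;>
    cases he : PySem.Str.startswith x "Expediente:" <;>
    · simp only [pvStepA, pvBit, pvFlag, hd, he]
      simp

theorem stepB_case (r : List String) (flag : Bool) (x : String) :
    pvStepB (r, flag) x = ((if pvBit x flag then r ++ [x] else r), pvFlag x flag) := by
  cases hd : PySem.Str.isIn "Derechos de Autor" x <;>
    cases he : PySem.Str.startswith x "Expediente:" <;>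
    · simp only [pvStepB, pvBit, pvFlag, hd, he]
      simp

-- A's first loop splits off the accumulated prefix.
theorem foldlA_acc (lst : List String) (g : List Bool) (flag : Bool) :
    lst.foldl pvStepA (g, flag)
      = (g ++ (lst.foldl pvStepA ([], flag)).1, (lst.foldl pvStepA ([], flag)).2) := by
  induction lst generalizing g flag with
  | nil => simp
  | cons x xs ih =>
      simp only [List.foldl_cons, stepA_case, List.nil_append]
      rw [ih (g ++ [pvBit x flag]) (pvFlag x flag), ih [pvBit x flag] (pvFlag x flag),
        List.append_assoc]

-- B's loop splits off the accumulated prefix.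
theorem foldlB_acc (lst : List String) (r : List String) (flag : Bool) :
    lst.foldl pvStepB (r, flag)
      = (r ++ (lst.foldl pvStepB ([], flag)).1, (lst.foldl pvStepB ([], flag)).2) := by
  induction lst generalizing r flag with
  | nil => simp
  | cons x xs ih =>
      simp only [List.foldl_cons, stepB_case, List.nil_append]
      cases hb : pvBit x flag
      · simp only [Bool.false_eq_true, if_false]
        rw [ih]
      · simp only [if_true]
        rw [ih (r ++ [x]) (pvFlag x flag), ih [x] (pvFlag x flag), List.append_assoc]

-- A's keep-flag list has one entry per input line.
theorem length_foldlA (lst : List String) (flag : Bool) :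
    ((lst.foldl pvStepA ([], flag)).1).length = lst.length := by
  induction lst generalizing flag with
  | nil => simp
  | cons x xs ih =>
      simp only [List.foldl_cons, stepA_case, List.nil_append]
      rw [foldlA_acc xs [pvBit x flag] (pvFlag x flag)]
      simp [ih (pvFlag x flag)]

-- The zip-filter fold splits off its accumulator.
theorem step2_acc (l : List (String × Bool)) (acc : List String) :
    l.foldl (fun r p => if p.2 then r ++ [p.1] else r) acc
      = acc ++ l.foldl (fun r p => if p.2 then r ++ [p.1] else r) [] := by
  induction l generalizing acc with
  | nil => simp
  | cons p l ih =>
      simp only [List.foldl_cons]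
      rw [ih, ih (if p.2 then [] ++ [p.1] else [])]
      by_cases hp : p.2 <;> simp [hp]

-- Zip-filtering A's keep bits against the lines equals B's loop result.
theorem zip_filter_eq_B (lst : List String) (flag : Bool) :
    (lst.zip (lst.foldl pvStepA ([], flag)).1).foldl
        (fun r p => if p.2 then r ++ [p.1] else r) []
      = (lst.foldl pvStepB ([], flag)).1 := by
  induction lst generalizing flag with
  | nil => simp
  | cons x xs ih =>
      simp only [List.foldl_cons, stepA_case, stepB_case, List.nil_append]
      rw [foldlA_acc xs [pvBit x flag] (pvFlag x flag),
        foldlB_acc xs (if pvBit x flag then [x] else []) (pvFlag x flag)]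
      simp only [List.singleton_append, List.zip_cons_cons, List.foldl_cons]
      rw [step2_acc]
      cases hb : pvBit x flag <;> simp [ih (pvFlag x flag)]

-- A's second, index-based pass is the zip-filter of the keep bits against the lines.
theorem passA_eq_zip (lst : List String) :
    eliminar_ruido lst
      = (lst.zip (lst.foldl pvStepA ([], true)).1).foldl
          (fun r p => if p.2 then r ++ [p.1] else r) [] := by
  have hlen : ((lst.foldl pvStepA ([], true)).1).length = lst.length := length_foldlA lst true
  unfold eliminar_ruido
  have hzlen : (lst.zip (lst.foldl pvStepA ([], true)).1).length = lst.length := by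
    simp [hlen]
  have hcongr :
      (PySem.List.pyRange 0 lst.length 1).foldl
        (fun lista_resultado i =>
          if PySem.List.pyGetD (lst.foldl pvStepA ([], true)).1 i false then
            lista_resultado ++ [PySem.List.pyGetD lst i ""]
          else lista_resultado) []
      = (PySem.List.pyRange 0 lst.length 1).foldl
          (fun r i =>
            if (PySem.List.pyGetD (lst.zip (lst.foldl pvStepA ([], true)).1) i ("", false)).2 then
              r ++ [(PySem.List.pyGetD (lst.zip (lst.foldl pvStepA ([], true)).1) i ("", false)).1]
            else r) [] := by
    apply PySem.List.foldl_congr_mem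
    intro acc i hi
    rcases (PySem.List.mem_pyRange_one).1 hi with ⟨h0, h1⟩
    have hilt : i < ((lst.zip (lst.foldl pvStepA ([], true)).1).length : Int) := by
      rw [hzlen]; exact_mod_cast h1
    have hilst : i < (lst.length : Int) := by exact_mod_cast h1
    have hig : i < (((lst.foldl pvStepA ([], true)).1).length : Int) := by
      rw [hlen]; exact_mod_cast h1
    rw [PySem.List.pyGetD_eq_getElem (lst.foldl pvStepA ([], true)).1 false h0 hig,
      PySem.List.pyGetD_eq_getElem lst "" h0 hilst,
      PySem.List.pyGetD_eq_getElem (lst.zip (lst.foldl pvStepA ([], true)).1) ("", false) h0 hilt,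
      List.getElem_zip]
  rw [hcongr]
  have hmain := PySem.List.foldl_pyRange_zero_pyGetD'
    (lst.zip (lst.foldl pvStepA ([], true)).1) (("", false))
    (fun (r : List String) (p : String × Bool) => if p.2 then r ++ [p.1] else r) ([] : List String)
  rw [← hzlen]
  exact hmain

-- ===== VERDICT (by name: the statement is the Claim_ definition above) =====
theorem eliminar_ruido_spec : Claim_equal_eliminar_ruido := by
  intro lst _
  show eliminar_ruido lst = eliminar_ruido_alt lst
  rw [passA_eq_zip, zip_filter_eq_B]
  rfl
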